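-- pv_equiv track=rewrite | github.com/xiaowh7/SemEval-2015-Task-10 | src/syntaxFeatureExtractor.py | findEmoticons
-- ===== SOURCE A (Python) =====
-- def findEmoticons(tokens, POStags, emoDict):
--     countEmoPos = 0
--     countEmoNeg = 0
--     isLastEmoPos = 0
--     isLastEmoNeg = 0
--     isLastTokenEmoPos = 0
--     isLastTokenEmoNeg = 0
--     isFirstTokenEmoPos = 0
--     isFirstTokenEmoNeg = 0
--     for i in range(len(tokens)):
--         if POStags[i] == 'E':
--             if tokens[i] in emoDict:
--
--                 emo = emoDict[tokens[i]]
--                 if emo == 'Extremely-Positive' or emo == 'Positive':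
--                     # countEmoExtremePos += 1
--                     countEmoPos += 1
--                     isLastEmoPos = 1
--                     isLastEmoNeg = 0
--                 if emo == 'Extremely-Negative' or emo == 'Negative':
--                     # countEmoExtremeENeg += 1
--                     countEmoNeg += 1
--                     isLastEmoPos = 0
--                     isLastEmoNeg = 1
--
--                 if i == len(tokens) - 1:
--                     # print "The last POStags is Emoticon %s" % emo
--                     if emo == 'Extremely-Positive' or emo == 'Positive':
--                         isLastTokenEmoPos = 1
--                     if emo == 'Extremely-Negative' or emo == 'Negative':
--                         isLastTokenEmoNeg = 1
--                 elif i == 0: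
--                     # print "The first POStags is Emoticon %s" % emo
--                     if emo == 'Extremely-Positive' or emo == 'Positive':
--                         isFirstTokenEmoPos = 1
--                     if emo == 'Extremely-Negative' or emo == 'Negative':
--                         isFirstTokenEmoNeg = 1
--     return [countEmoPos, countEmoNeg,
--             isLastEmoPos, isLastEmoNeg,
--             isFirstTokenEmoPos, isFirstTokenEmoNeg,
--             isLastTokenEmoPos, isLastTokenEmoNeg]
-- ===== SOURCE B (Python) =====
-- def findEmoticons(tokens, POStags, emoDict):
--     n = len(tokens)
--
--     def pol(e):
--         if e in ('Extremely-Positive', 'Positive'):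
--             return 1
--         if e in ('Extremely-Negative', 'Negative'):
--             return -1
--         return 0
--
--     pols = [(i, pol(emoDict[tokens[i]]))
--             for i in range(n)
--             if POStags[i] == 'E' and tokens[i] in emoDict]
--
--     countPos = sum(1 for _, p in pols if p == 1)
--     countNeg = sum(1 for _, p in pols if p == -1)
--
--     last = next((p for _, p in reversed(pols) if p != 0), 0)
--     lastPos = 1 if last == 1 else 0
--     lastNeg = 1 if last == -1 else 0
--
--     def polAt(j):
--         return next((p for i, p in pols if i == j), 0)
--
--     firstPos = firstNeg = lastTokPos = lastTokNeg = 0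
--     if n > 0:
--         p = polAt(n - 1)
--         lastTokPos = 1 if p == 1 else 0
--         lastTokNeg = 1 if p == -1 else 0
--         if n - 1 != 0:
--             q = polAt(0)
--             firstPos = 1 if q == 1 else 0
--             firstNeg = 1 if q == -1 else 0
--
--     return [countPos, countNeg, lastPos, lastNeg,
--             firstPos, firstNeg, lastTokPos, lastTokNeg]
-- ===== Notes on version B (the rewrite author's own statement) =====
-- stated objective: alternative
-- what changed: A's single index loop threading eight mutable counters/flags is replaced by building the classified (index, polarity) list once and deriving each output from it separately (counts by summation, sticky flags by a reverse scan, endpoint flags by keyed lookup).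
import Mathlib
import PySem

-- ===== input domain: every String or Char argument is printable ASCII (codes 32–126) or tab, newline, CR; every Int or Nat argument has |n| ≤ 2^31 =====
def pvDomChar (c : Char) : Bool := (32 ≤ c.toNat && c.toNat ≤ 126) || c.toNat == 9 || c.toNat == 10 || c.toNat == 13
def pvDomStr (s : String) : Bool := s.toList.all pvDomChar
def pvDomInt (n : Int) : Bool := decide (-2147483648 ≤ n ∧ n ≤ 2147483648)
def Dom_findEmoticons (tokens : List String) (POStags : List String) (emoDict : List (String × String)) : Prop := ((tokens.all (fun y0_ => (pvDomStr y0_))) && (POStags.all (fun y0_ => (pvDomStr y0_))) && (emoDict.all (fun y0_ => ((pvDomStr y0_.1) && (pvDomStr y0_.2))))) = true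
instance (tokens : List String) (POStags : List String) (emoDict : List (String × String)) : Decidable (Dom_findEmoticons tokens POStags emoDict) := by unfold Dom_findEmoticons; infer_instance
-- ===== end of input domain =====

-- B replaces A's single stateful index loop by building the classified (index, polarity)
-- list once and deriving each of the eight outputs from it separately (a different
-- decomposition, same asymptotic cost); return values only, neither version mutates.

-- ===== PORT A =====
-- the loop body of A, one step of the fold (state: cp, cn, lp, ln, fp, fn, ltp, ltn)
def findEmoStep (d : PySem.Dict String String) (n : Int) (tokens POStags : List String)
    (st : Int × Int × Int × Int × Int × Int × Int × Int) (i : Int) :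
    Int × Int × Int × Int × Int × Int × Int × Int :=
  match st with
  | (cp, cn, lp, ln, fp, fn, ltp, ltn) =>
    if PySem.List.pyGetD POStags i "" = "E" then
      match d.get? (PySem.List.pyGetD tokens i "") with
      | some emo =>
        let (cp, lp, ln) :=
          if emo = "Extremely-Positive" ∨ emo = "Positive" then (cp + 1, (1 : Int), (0 : Int))
          else (cp, lp, ln)
        let (cn, lp, ln) :=
          if emo = "Extremely-Negative" ∨ emo = "Negative" then (cn + 1, (0 : Int), (1 : Int))
          else (cn, lp, ln)
        if i = n - 1 then
          (cp, cn, lp, ln, fp, fn,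
           (if emo = "Extremely-Positive" ∨ emo = "Positive" then 1 else ltp),
           (if emo = "Extremely-Negative" ∨ emo = "Negative" then 1 else ltn))
        else if i = 0 then
          (cp, cn, lp, ln,
           (if emo = "Extremely-Positive" ∨ emo = "Positive" then 1 else fp),
           (if emo = "Extremely-Negative" ∨ emo = "Negative" then 1 else fn),
           ltp, ltn)
        else (cp, cn, lp, ln, fp, fn, ltp, ltn)
      | none => (cp, cn, lp, ln, fp, fn, ltp, ltn)
    else (cp, cn, lp, ln, fp, fn, ltp, ltn)

def findEmoticons (tokens : List String) (POStags : List String) (emoDict : List (String × String)) : List Int :=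
  let d := PySem.Dict.ofList emoDict
  let n : Int := (tokens.length : Int)
  let st := (PySem.List.pyRange 0 n 1).foldl (findEmoStep d n tokens POStags) (0, 0, 0, 0, 0, 0, 0, 0)
  [st.1, st.2.1, st.2.2.1, st.2.2.2.1, st.2.2.2.2.1, st.2.2.2.2.2.1, st.2.2.2.2.2.2.1, st.2.2.2.2.2.2.2]

-- ===== PORT B =====
-- B's pol(e): +1 for (extremely) positive, -1 for (extremely) negative, 0 otherwise
def pvPol (e : String) : Int :=
  if e = "Extremely-Positive" ∨ e = "Positive" then 1
  else if e = "Extremely-Negative" ∨ e = "Negative" then -1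
  else 0

def findEmoticons_alt (tokens : List String) (POStags : List String) (emoDict : List (String × String)) : List Int :=
  let n : Int := (tokens.length : Int)
  let d := PySem.Dict.ofList emoDict
  -- the comprehension: classified positions with their polarity (in range, POStags[i]=='E', tokens[i] in emoDict)
  let pols : List (Int × Int) :=
    (PySem.List.pyRange 0 n 1).filterMap
      (fun i => if PySem.List.pyGetD POStags i "" = "E" then
                  (d.get? (PySem.List.pyGetD tokens i "")).map (fun e => (i, pvPol e))
                else none)
  let countPos : Int := (pols.countP (fun p => p.2 == 1) : Int)
  let countNeg : Int := (pols.countP (fun p => p.2 == -1) : Int)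
  let last : Int := ((pols.reverse.find? (fun p => p.2 != 0)).map (fun p => p.2)).getD 0
  let lastPos : Int := if last = 1 then 1 else 0
  let lastNeg : Int := if last = -1 then 1 else 0
  let polAt : Int → Int := fun j => ((pols.find? (fun p => p.1 == j)).map (fun p => p.2)).getD 0
  let flags : Int × Int × Int × Int :=
    if 0 < n then
      let p := polAt (n - 1)
      let ltp : Int := if p = 1 then 1 else 0
      let ltn : Int := if p = -1 then 1 else 0
      if n - 1 ≠ 0 then
        let q := polAt 0
        ((if q = 1 then (1 : Int) else 0), (if q = -1 then (1 : Int) else 0), ltp, ltn)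
      else ((0 : Int), (0 : Int), ltp, ltn)
    else ((0 : Int), (0 : Int), (0 : Int), (0 : Int))
  [countPos, countNeg, lastPos, lastNeg, flags.1, flags.2.1, flags.2.2.1, flags.2.2.2]

-- ===== PRECONDITION & SPEC =====
-- Both A and B index POStags[i] for every i < len(tokens), so both raise IndexError
-- (return nothing) exactly when POStags is shorter than tokens; Pre_ excludes only those inputs.
def Pre_findEmoticons (tokens : List String) (POStags : List String) (emoDict : List (String × String)) : Prop :=
  tokens.length ≤ POStags.length
instance (tokens : List String) (POStags : List String) (emoDict : List (String × String)) : Decidable (Pre_findEmoticons tokens POStags emoDict) := by unfold Pre_findEmoticons; infer_instance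

def pvWitness_findEmoticons : List String × List String × (List (String × String)) :=
  ([":)", "ok", ":("], ["E", "N", "E"], [(":)", "Positive"), (":(", "Negative")])

def Spec_findEmoticons (tokens : List String) (POStags : List String) (emoDict : List (String × String)) (out : List Int) : Prop := out = findEmoticons_alt tokens POStags emoDict
instance (tokens : List String) (POStags : List String) (emoDict : List (String × String)) (out : List Int) : Decidable (Spec_findEmoticons tokens POStags emoDict out) := by unfold Spec_findEmoticons; infer_instance

-- ===== CLAIM (what is proved, stated in full; the proofs are below) =====
def Claim_equal_findEmoticons : Prop := ∀ (tokens : List String) (POStags : List String) (emoDict : List (String × String)), Dom_findEmoticons tokens POStags emoDict → Pre_findEmoticons tokens POStags emoDict → Spec_findEmoticons tokens POStags emoDict (findEmoticons tokens POStags emoDict)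

-- ===== LEMMAS AND PROOFS =====

-- classification of position i (tag 'E' and token in the dict), abstracted as cls below
def clsE (tokens POStags : List String) (emoDict : List (String × String)) (i : Int) : Option String :=
  if PySem.List.pyGetD POStags i "" = "E" then (PySem.Dict.ofList emoDict).get? (PySem.List.pyGetD tokens i "") else none

-- polarity at position i (0 when unclassified or neutral)
def pAtC (cls : Int → Option String) (i : Int) : Int := ((cls i).map pvPol).getD 0

-- A's step written through an abstract classifier
def stepC (cls : Int → Option String) (n : Int)
    (st : Int × Int × Int × Int × Int × Int × Int × Int) (i : Int) :
    Int × Int × Int × Int × Int × Int × Int × Int :=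
  match st with
  | (cp, cn, lp, ln, fp, fn, ltp, ltn) =>
    match cls i with
    | some emo =>
      let (cp, lp, ln) :=
        if emo = "Extremely-Positive" ∨ emo = "Positive" then (cp + 1, (1 : Int), (0 : Int))
        else (cp, lp, ln)
      let (cn, lp, ln) :=
        if emo = "Extremely-Negative" ∨ emo = "Negative" then (cn + 1, (0 : Int), (1 : Int))
        else (cn, lp, ln)
      if i = n - 1 then
        (cp, cn, lp, ln, fp, fn,
         (if emo = "Extremely-Positive" ∨ emo = "Positive" then 1 else ltp),
         (if emo = "Extremely-Negative" ∨ emo = "Negative" then 1 else ltn))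
      else if i = 0 then
        (cp, cn, lp, ln,
         (if emo = "Extremely-Positive" ∨ emo = "Positive" then 1 else fp),
         (if emo = "Extremely-Negative" ∨ emo = "Negative" then 1 else fn),
         ltp, ltn)
      else (cp, cn, lp, ln, fp, fn, ltp, ltn)
    | none => (cp, cn, lp, ln, fp, fn, ltp, ltn)

lemma findEmoStep_eq_stepC (tokens POStags : List String) (emoDict : List (String × String)) (n : Int) :
    findEmoStep (PySem.Dict.ofList emoDict) n tokens POStags = stepC (clsE tokens POStags emoDict) n := by
  funext st i
  obtain ⟨cp, cn, lp, ln, fp, fn, ltp, ltn⟩ := st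
  simp only [findEmoStep, stepC, clsE]
  by_cases hE : PySem.List.pyGetD POStags i "" = "E" <;> simp [hE]

-- the eight components of A's state after processing an arbitrary index list l
def cpS (cls : Int → Option String) (l : List Int) : Int := (l.countP (fun i => pAtC cls i == 1) : Int)
def cnS (cls : Int → Option String) (l : List Int) : Int := (l.countP (fun i => pAtC cls i == -1) : Int)
def lpS (cls : Int → Option String) (l : List Int) : Int :=
  if (((l.reverse.find? (fun i => pAtC cls i != 0)).map (pAtC cls)).getD 0) = 1 then 1 else 0
def lnS (cls : Int → Option String) (l : List Int) : Int :=
  if (((l.reverse.find? (fun i => pAtC cls i != 0)).map (pAtC cls)).getD 0) = -1 then 1 else 0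
def fpS (cls : Int → Option String) (n : Int) (l : List Int) : Int :=
  if (0 : Int) ∈ l ∧ ¬((0 : Int) = n - 1) ∧ pAtC cls 0 = 1 then 1 else 0
def fnS (cls : Int → Option String) (n : Int) (l : List Int) : Int :=
  if (0 : Int) ∈ l ∧ ¬((0 : Int) = n - 1) ∧ pAtC cls 0 = -1 then 1 else 0
def ltpS (cls : Int → Option String) (n : Int) (l : List Int) : Int :=
  if (n - 1) ∈ l ∧ pAtC cls (n - 1) = 1 then 1 else 0
def ltnS (cls : Int → Option String) (n : Int) (l : List Int) : Int :=
  if (n - 1) ∈ l ∧ pAtC cls (n - 1) = -1 then 1 else 0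

lemma pAtC_cases (cls : Int → Option String) (x : Int) :
    pAtC cls x = 1 ∨ pAtC cls x = 0 ∨ pAtC cls x = -1 := by
  cases h : cls x with
  | none => simp [pAtC, h]
  | some e =>
    simp only [pAtC, h, Option.map_some, Option.getD_some, pvPol]
    split_ifs <;> simp

lemma cpS_append (cls : Int → Option String) (l : List Int) (x : Int) :
    cpS cls (l ++ [x]) = cpS cls l + (if pAtC cls x = 1 then 1 else 0) := by
  simp [cpS, List.countP_append, List.countP_singleton]

lemma cnS_append (cls : Int → Option String) (l : List Int) (x : Int) :
    cnS cls (l ++ [x]) = cnS cls l + (if pAtC cls x = -1 then 1 else 0) := by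
  simp [cnS, List.countP_append, List.countP_singleton]

lemma lpS_append (cls : Int → Option String) (l : List Int) (x : Int) :
    lpS cls (l ++ [x]) = if pAtC cls x = 1 then 1 else if pAtC cls x = 0 then lpS cls l else 0 := by
  rcases pAtC_cases cls x with h | h | h <;>
    simp [lpS, List.reverse_append, List.find?_cons, h]

lemma lnS_append (cls : Int → Option String) (l : List Int) (x : Int) :
    lnS cls (l ++ [x]) = if pAtC cls x = -1 then 1 else if pAtC cls x = 0 then lnS cls l else 0 := by
  rcases pAtC_cases cls x with h | h | h <;>
    simp [lnS, List.reverse_append, List.find?_cons, h]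

lemma ltpS_append (cls : Int → Option String) (n : Int) (l : List Int) (x : Int) :
    ltpS cls n (l ++ [x]) = if x = n - 1 ∧ pAtC cls x = 1 then 1 else ltpS cls n l := by
  by_cases hx : x = n - 1
  · subst hx
    by_cases hp : pAtC cls (n - 1) = 1 <;> simp [ltpS, hp]
  · have hx' : ¬(n - 1 = x) := fun h => hx h.symm
    simp [ltpS, hx, hx']

lemma ltnS_append (cls : Int → Option String) (n : Int) (l : List Int) (x : Int) :
    ltnS cls n (l ++ [x]) = if x = n - 1 ∧ pAtC cls x = -1 then 1 else ltnS cls n l := by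
  by_cases hx : x = n - 1
  · subst hx
    by_cases hp : pAtC cls (n - 1) = -1 <;> simp [ltnS, hp]
  · have hx' : ¬(n - 1 = x) := fun h => hx h.symm
    simp [ltnS, hx, hx']

lemma fpS_append (cls : Int → Option String) (n : Int) (l : List Int) (x : Int) :
    fpS cls n (l ++ [x]) =
      if x = 0 ∧ ¬((0 : Int) = n - 1) ∧ pAtC cls 0 = 1 then 1 else fpS cls n l := by
  by_cases hx : x = 0
  · subst hx
    by_cases hq : (0 : Int) = n - 1 <;> by_cases hp : pAtC cls 0 = 1 <;> simp [fpS, hq, hp]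
  · have hx' : ¬((0 : Int) = x) := fun h => hx h.symm
    simp [fpS, hx, hx']

lemma fnS_append (cls : Int → Option String) (n : Int) (l : List Int) (x : Int) :
    fnS cls n (l ++ [x]) =
      if x = 0 ∧ ¬((0 : Int) = n - 1) ∧ pAtC cls 0 = -1 then 1 else fnS cls n l := by
  by_cases hx : x = 0
  · subst hx
    by_cases hq : (0 : Int) = n - 1 <;> by_cases hp : pAtC cls 0 = -1 <;> simp [fnS, hq, hp]
  · have hx' : ¬((0 : Int) = x) := fun h => hx h.symm
    simp [fnS, hx, hx']

lemma foldA_spec (cls : Int → Option String) (n : Int) (l : List Int) :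
    l.foldl (stepC cls n) (0, 0, 0, 0, 0, 0, 0, 0) =
      (cpS cls l, cnS cls l, lpS cls l, lnS cls l, fpS cls n l, fnS cls n l, ltpS cls n l, ltnS cls n l) := by
  induction l using List.reverseRecOn with
  | nil => simp [cpS, cnS, lpS, lnS, fpS, fnS, ltpS, ltnS]
  | append_singleton l x ih =>
    rw [List.foldl_append, ih, List.foldl_cons, List.foldl_nil,
        cpS_append, cnS_append, lpS_append, lnS_append, fpS_append, fnS_append,
        ltpS_append, ltnS_append]
    cases hcls : cls x with
    | none =>
      have h0 : pAtC cls x = 0 := by simp [pAtC, hcls]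
      by_cases hx0 : x = 0
      · subst hx0; simp [stepC, hcls, h0]
      · simp [stepC, hcls, h0, hx0]
    | some e =>
      by_cases hP : e = "Extremely-Positive" ∨ e = "Positive"
      · have h1 : pAtC cls x = 1 := by simp [pAtC, hcls, pvPol, hP]
        have hN : ¬(e = "Extremely-Negative" ∨ e = "Negative") := by
          rcases hP with rfl | rfl <;> simp
        by_cases hxn : x = n - 1
        · subst hxn
          have hfp : ¬(n - 1 = 0 ∧ ¬((0 : Int) = n - 1) ∧ pAtC cls 0 = 1) := by
            rintro ⟨a, b, _⟩; exact b a.symm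
          have hfn : ¬(n - 1 = 0 ∧ ¬((0 : Int) = n - 1) ∧ pAtC cls 0 = -1) := by
            rintro ⟨a, b, _⟩; exact b a.symm
          simp [stepC, hcls, hP, hN, h1, hfp, hfn]
        · by_cases hx0 : x = 0
          · subst hx0
            simp [stepC, hcls, hP, hN, h1, hxn]
          · simp [stepC, hcls, hP, hN, h1, hxn, hx0]
      · by_cases hNeg : e = "Extremely-Negative" ∨ e = "Negative"
        · have h1 : pAtC cls x = -1 := by simp [pAtC, hcls, pvPol, hP, hNeg]
          by_cases hxn : x = n - 1
          · subst hxn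
            have hfp : ¬(n - 1 = 0 ∧ ¬((0 : Int) = n - 1) ∧ pAtC cls 0 = 1) := by
              rintro ⟨a, b, _⟩; exact b a.symm
            have hfn : ¬(n - 1 = 0 ∧ ¬((0 : Int) = n - 1) ∧ pAtC cls 0 = -1) := by
              rintro ⟨a, b, _⟩; exact b a.symm
            simp [stepC, hcls, hP, hNeg, h1, hfp, hfn]
          · by_cases hx0 : x = 0
            · subst hx0
              simp [stepC, hcls, hP, hNeg, h1, hxn]
            · simp [stepC, hcls, hP, hNeg, h1, hxn, hx0]
        · have h0 : pAtC cls x = 0 := by simp [pAtC, hcls, pvPol, hP, hNeg]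
          by_cases hx0 : x = 0
          · subst hx0; simp [stepC, hcls, hP, hNeg, h0]
          · simp [stepC, hcls, hP, hNeg, h0, hx0]

-- B's entry builder, abstracted
def gC (cls : Int → Option String) (i : Int) : Option (Int × Int) := (cls i).map (fun e => (i, pvPol e))

-- B's comprehension body is exactly gC of the classifier
lemma b_body_eq_gC (tokens POStags : List String) (emoDict : List (String × String)) :
    (fun i => if PySem.List.pyGetD POStags i "" = "E" then
        ((PySem.Dict.ofList emoDict).get? (PySem.List.pyGetD tokens i "")).map (fun e => (i, pvPol e))
      else none) = gC (clsE tokens POStags emoDict) := by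
  funext i
  simp only [gC, clsE]
  by_cases hE : PySem.List.pyGetD POStags i "" = "E" <;> simp [hE]

lemma countP_filterMap_gC (cls : Int → Option String) (v : Int) (hv : v ≠ 0) (l : List Int) :
    (l.filterMap (gC cls)).countP (fun p => p.2 == v) = l.countP (fun i => pAtC cls i == v) := by
  induction l with
  | nil => rfl
  | cons i l ih =>
    cases h : cls i with
    | none =>
      have hg : gC cls i = none := by simp [gC, h]
      have h0 : pAtC cls i = 0 := by simp [pAtC, h]
      have hv' : ¬((0 : Int) = v) := fun hh => hv hh.symm
      rw [List.filterMap_cons_none hg, ih, List.countP_cons]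
      simp [h0, hv']
    | some e =>
      have hg : gC cls i = some (i, pvPol e) := by simp [gC, h]
      have hp : pAtC cls i = pvPol e := by simp [pAtC, h]
      rw [List.filterMap_cons_some hg, List.countP_cons, List.countP_cons, ih]
      simp [hp]

lemma find?_filterMap_gC (cls : Int → Option String) (l : List Int) :
    (l.filterMap (gC cls)).find? (fun p => p.2 != 0) =
      (l.find? (fun i => pAtC cls i != 0)).map (fun i => (i, pAtC cls i)) := by
  induction l with
  | nil => rfl
  | cons i l ih =>
    cases h : cls i with
    | none =>
      have hg : gC cls i = none := by simp [gC, h]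
      have h0 : pAtC cls i = 0 := by simp [pAtC, h]
      rw [List.filterMap_cons_none hg, List.find?_cons_of_neg (by simp [h0]), ih]
    | some e =>
      have hg : gC cls i = some (i, pvPol e) := by simp [gC, h]
      have hp : pAtC cls i = pvPol e := by simp [pAtC, h]
      by_cases hz : pvPol e = 0
      · rw [List.filterMap_cons_some hg, List.find?_cons_of_neg (by simp [hz]),
            List.find?_cons_of_neg (by simp [hp, hz]), ih]
      · rw [List.filterMap_cons_some hg, List.find?_cons_of_pos (by simp [hz]),
            List.find?_cons_of_pos (by simp [hp, hz])]
        simp [hp]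

lemma find?_key_filterMap_gC (cls : Int → Option String) (j : Int) (l : List Int) (hl : l.Nodup) :
    (l.filterMap (gC cls)).find? (fun p => p.1 == j) = if j ∈ l then gC cls j else none := by
  induction l with
  | nil => simp
  | cons i l ih =>
    have hnd := List.nodup_cons.mp hl
    cases h : cls i with
    | none =>
      have hg : gC cls i = none := by simp [gC, h]
      rw [List.filterMap_cons_none hg, ih hnd.2]
      by_cases hj : j = i
      · subst hj
        simp [hnd.1, hg]
      · simp [hj]
    | some e =>
      have hg : gC cls i = some (i, pvPol e) := by simp [gC, h]
      by_cases hj : j = i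
      · subst hj
        rw [List.filterMap_cons_some hg, List.find?_cons_of_pos (by simp)]
        simp [hg]
      · have hij : ¬(i = j) := fun hh => hj hh.symm
        rw [List.filterMap_cons_some hg, List.find?_cons_of_neg (by simp [hij]), ih hnd.2]
        simp [hj]

lemma map_snd_gC_getD (cls : Int → Option String) (j : Int) :
    ((gC cls j).map (fun p => p.2)).getD 0 = pAtC cls j := by
  cases h : cls j <;> simp [gC, pAtC, h]

-- ===== VERDICT (by name: the statement is the Claim_ definition above) =====
theorem findEmoticons_spec : Claim_equal_findEmoticons := by
  intro tokens POStags emoDict hdom hpre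
  unfold Spec_findEmoticons
  simp only [findEmoticons, findEmoticons_alt]
  rw [findEmoStep_eq_stepC, foldA_spec, b_body_eq_gC tokens POStags emoDict]
  set cls := clsE tokens POStags emoDict with hclsdef
  set n : Int := (tokens.length : Int) with hndef
  set l := PySem.List.pyRange 0 n 1 with hldef
  by_cases h0n : 0 < n
  · have hmem1 : (n - 1) ∈ l := by rw [hldef, PySem.List.mem_pyRange_one]; omega
    have hmem0 : (0 : Int) ∈ l := by rw [hldef, PySem.List.mem_pyRange_one]; omega
    have hnd : l.Nodup := by rw [hldef]; exact PySem.List.nodup_pyRange_one 0 n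
    have hkey : ∀ j : Int, j ∈ l →
        (((l.filterMap (gC cls)).find? (fun p => p.1 == j)).map (fun p => p.2)).getD 0 = pAtC cls j := by
      intro j hjmem
      rw [find?_key_filterMap_gC cls j l hnd, if_pos hjmem, map_snd_gC_getD]
    simp only [if_pos h0n, countP_filterMap_gC cls 1 one_ne_zero,
      countP_filterMap_gC cls (-1) (by norm_num), ← List.filterMap_reverse,
      find?_filterMap_gC, Option.map_map, hkey (n - 1) hmem1, hkey 0 hmem0]
    by_cases h1 : n - 1 = 0
    · have hfp : ¬((0 : Int) ∈ l ∧ ¬((0 : Int) = n - 1) ∧ pAtC cls 0 = 1) := by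
        rintro ⟨_, b, _⟩; exact b h1.symm
      have hfn : ¬((0 : Int) ∈ l ∧ ¬((0 : Int) = n - 1) ∧ pAtC cls 0 = -1) := by
        rintro ⟨_, b, _⟩; exact b h1.symm
      simp [cpS, cnS, lpS, lnS, fpS, fnS, ltpS, ltnS, h1, hfp, hfn, hmem1, hmem0, Function.comp_def]
    · have h1' : ¬((0 : Int) = n - 1) := fun hh => h1 hh.symm
      simp [cpS, cnS, lpS, lnS, fpS, fnS, ltpS, ltnS, h1, h1', hmem1, hmem0, Function.comp_def]
  · have hn0 : n = 0 := by omega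
    have hlnil : l = [] := by rw [hldef, hn0]; rfl
    simp [hlnil, cpS, cnS, lpS, lnS, fpS, fnS, ltpS, ltnS, h0n]
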